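-- pv_equiv track=rewrite | github.com/henley-regatta/adventofcode2021 | python/day21part2.py | calcFromToCounters
-- ===== SOURCE A (Python) =====
-- def calcFromToCounters(finishPositions) :
--     fromToCounters={}
--     for f in range(len(finishPositions)) :
--         tCounts={}
--         for t in range(1,11) :
--             if t in finishPositions[f] :
--                 tCounts[t] = finishPositions[f].count(t)
--         fromToCounters[f+1]=tCounts
--     return fromToCounters
-- ===== SOURCE B (Python) =====
-- def _tally(s):
--     """Run-length encode the sorted list s into [(value, run length), ...]."""
--     pairs = []
--     i = 0
--     while i < len(s):
--         v = s[i]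
--         j = i + 1
--         while j < len(s) and s[j] == v:
--             j += 1
--         pairs.append((v, j - i))
--         i = j
--     return pairs
--
--
-- def calcFromToCounters(finishPositions):
--     return {f: {t: c for t, c in _tally(sorted(row)) if 1 <= t <= 10}
--             for f, row in enumerate(finishPositions, 1)}
-- ===== Notes on version B (the rewrite author's own statement) =====
-- stated objective: alternative
-- what changed: B sorts each player's row once and run-length-encodes it recursively into (value, multiplicity) pairs, then projects the runs with value in 1..10 into the per-player dict, instead of A's loop over t=1..10 doing a membership scan plus a count() rescan of the row for every t.
import Mathlib
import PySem

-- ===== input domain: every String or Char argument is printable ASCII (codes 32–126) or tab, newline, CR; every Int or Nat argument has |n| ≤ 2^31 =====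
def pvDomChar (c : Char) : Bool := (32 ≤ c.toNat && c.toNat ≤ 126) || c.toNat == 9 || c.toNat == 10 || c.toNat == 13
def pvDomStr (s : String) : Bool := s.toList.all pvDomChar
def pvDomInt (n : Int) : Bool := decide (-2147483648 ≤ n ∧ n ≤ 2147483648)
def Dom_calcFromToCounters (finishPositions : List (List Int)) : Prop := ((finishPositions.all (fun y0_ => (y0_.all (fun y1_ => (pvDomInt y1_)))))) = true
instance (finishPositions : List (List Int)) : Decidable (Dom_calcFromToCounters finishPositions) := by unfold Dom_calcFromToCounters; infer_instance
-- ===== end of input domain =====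

-- B sorts each row once and run-length-encodes it, then keeps the runs with value in 1..10,
-- instead of A's per-target membership scan plus count() rescan for each t in 1..10
-- (objective: alternative algorithm; return value proved equal).

-- ===== PORT A =====
def calcFromToCounters (finishPositions : List (List Int)) : List (Int × List (Int × Int)) :=
  ((PySem.List.pyRange 0 finishPositions.length 1).foldl
    (fun (fromToCounters : PySem.Dict Int (List (Int × Int))) f =>
      let row := PySem.List.pyGetD finishPositions f []
      let tCounts : PySem.Dict Int Int :=
        (PySem.List.pyRange 1 11 1).foldl
          (fun tC t =>
            if row.contains t then tC.insert t ((PySem.List.count row t : Int)) else tC)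
          PySem.Dict.empty
      fromToCounters.insert (f + 1) tCounts.items)
    PySem.Dict.empty).items

-- ===== PORT B =====
-- _tally(s): run-length encode the sorted list s; the outer `while i < len(s)` loop is the
-- recursion on i with the accumulated pairs list, and the inner counting `while` loop
-- (j scanning the equal prefix) is ported as the length of the equal takeWhile-prefix of
-- s[i+1:], which is exactly the j that loop computes.
def pvTally (s : List Int) (i : Nat) (pairs : List (Int × Int)) : List (Int × Int) :=
  if h : i < s.length then
    let v := s[i]
    let j := i + 1 + ((s.drop (i + 1)).takeWhile (fun x => x == v)).length
    pvTally s j (pairs ++ [(v, (j : Int) - (i : Int))])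
  else pairs
termination_by s.length - i
decreasing_by omega

def calcFromToCounters_alt (finishPositions : List (List Int)) : List (Int × List (Int × Int)) :=
  ((PySem.List.enumerate finishPositions 1).foldl
    (fun (result : PySem.Dict Int (List (Int × Int))) p =>
      result.insert p.1
        (((pvTally (PySem.List.sorted p.2 (fun x => x) false) 0 []).foldl
            (fun (d : PySem.Dict Int Int) tc =>
              if (decide (1 ≤ tc.1) && decide (tc.1 ≤ 10)) then d.insert tc.1 tc.2 else d)
            PySem.Dict.empty).items))
    PySem.Dict.empty).items

-- ===== PRECONDITION & SPEC =====
def Spec_calcFromToCounters (finishPositions : List (List Int)) (out : List (Int × List (Int × Int))) : Prop := out = calcFromToCounters_alt finishPositions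
instance (finishPositions : List (List Int)) (out : List (Int × List (Int × Int))) : Decidable (Spec_calcFromToCounters finishPositions out) := by unfold Spec_calcFromToCounters; infer_instance

-- ===== CLAIM (what is proved, stated in full; the proofs are below) =====
def Claim_equal_calcFromToCounters : Prop := ∀ (finishPositions : List (List Int)), Dom_calcFromToCounters finishPositions → Spec_calcFromToCounters finishPositions (calcFromToCounters finishPositions)

-- ===== LEMMAS AND PROOFS =====

-- A clean list-recursive run-length encoder used only in the proofs.
def tallyL : List Int → List (Int × Int)
  | [] => []
  | v :: rest =>
    (v, ((rest.takeWhile (fun x => x == v)).length : Int) + 1) ::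
      tallyL (rest.dropWhile (fun x => x == v))
termination_by l => l.length
decreasing_by
  simp only [List.length_cons]
  have := List.length_dropWhile_le (fun x => x == v) rest
  omega

lemma drop_length_takeWhile (p : Int → Bool) (l : List Int) :
    l.drop (l.takeWhile p).length = l.dropWhile p := by
  have h := List.takeWhile_append_dropWhile (p := p) (l := l)
  calc l.drop (l.takeWhile p).length
      = (l.takeWhile p ++ l.dropWhile p).drop (l.takeWhile p).length := by rw [h]
    _ = l.dropWhile p := List.drop_left

lemma pvTally_eq_tallyL (s : List Int) (i : Nat) (pairs : List (Int × Int)) :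
    pvTally s i pairs = pairs ++ tallyL (s.drop i) := by
  have main : ∀ n i pairs, s.length - i ≤ n → pvTally s i pairs = pairs ++ tallyL (s.drop i) := by
    intro n
    induction n with
    | zero =>
      intro i pairs hle
      rw [pvTally, dif_neg (by omega), List.drop_eq_nil_of_le (by omega), tallyL,
        List.append_nil]
    | succ n ihn =>
      intro i pairs hle
      by_cases h : i < s.length
      · rw [pvTally]
        simp only [dif_pos h]
        rw [List.drop_eq_getElem_cons h, tallyL, ihn _ _ (by omega)]
        rw [List.append_assoc, List.singleton_append]
        refine congrArg _ (congrArg₂ _ (congrArg _ ?_) ?_)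
        · show ((i + 1 + ((s.drop (i + 1)).takeWhile (fun x => x == s[i])).length : Nat) : Int)
              - (i : Int)
            = ((s.drop (i + 1)).takeWhile (fun x => x == s[i])).length + 1
          push_cast; ring
        · have : s.drop (i + 1 + ((s.drop (i + 1)).takeWhile (fun x => x == s[i])).length)
              = (s.drop (i + 1)).dropWhile (fun x => x == s[i]) := by
            rw [← drop_length_takeWhile (fun x => x == s[i]) (s.drop (i + 1)), List.drop_drop]
          rw [this]
      · rw [pvTally, dif_neg h, List.drop_eq_nil_of_le (by omega), tallyL, List.append_nil]
  exact main (s.length - i) i pairs le_rfl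

-- the value strictly dominating every element of a dropWhile-(== v) tail of a sorted list
lemma lt_of_mem_dropWhile (v : Int) (rest : List Int)
    (hrest : rest.Pairwise (· ≤ ·)) (hvle : ∀ x ∈ rest, v ≤ x) :
    ∀ x ∈ rest.dropWhile (fun x => x == v), v < x := by
  intro x hx
  rcases e : rest.dropWhile (fun x => x == v) with _ | ⟨h0, tt⟩
  · rw [e] at hx; cases hx
  · have hph0 : (h0 == v) = false := by
      have := List.head?_dropWhile_not (fun x => x == v) rest
      rw [e] at this; simpa using this
    have hh0ne : h0 ≠ v := by simpa using hph0
    have hsub : (rest.dropWhile (fun x => x == v)).Sublist rest := List.dropWhile_sublist _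
    have hmemrest : ∀ y ∈ rest.dropWhile (fun x => x == v), y ∈ rest := fun y hy => hsub.mem hy
    have hvh0 : v < h0 := by
      have := hvle h0 (hmemrest h0 (by rw [e]; exact List.mem_cons_self))
      omega
    rw [e] at hx
    rcases List.mem_cons.mp hx with rfl | hxt
    · exact hvh0
    · have hpw : (h0 :: tt).Pairwise (· ≤ ·) := by
        rw [← e]; exact List.Pairwise.sublist (List.dropWhile_sublist _) hrest
      have := (List.pairwise_cons.mp hpw).1 x hxt
      omega

lemma mem_tallyL (s : List Int) (hs : s.Pairwise (· ≤ ·)) (t c : Int) :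
    (t, c) ∈ tallyL s ↔ t ∈ s ∧ c = (s.count t : Int) := by
  induction s using tallyL.induct with
  | case1 => simp [tallyL]
  | case2 v rest ih =>
    have hrest : rest.Pairwise (· ≤ ·) := (List.pairwise_cons.mp hs).2
    have hvle : ∀ x ∈ rest, v ≤ x := (List.pairwise_cons.mp hs).1
    have htl : (rest.dropWhile (fun x => x == v)).Pairwise (· ≤ ·) :=
      List.Pairwise.sublist (List.dropWhile_sublist _) hrest
    have hgt := lt_of_mem_dropWhile v rest hrest hvle
    have hgrp : ∀ x ∈ rest.takeWhile (fun x => x == v), x = v := by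
      intro x hx
      simpa using List.mem_takeWhile_imp hx
    have hsplit : rest = rest.takeWhile (fun x => x == v) ++ rest.dropWhile (fun x => x == v) :=
      (List.takeWhile_append_dropWhile).symm
    have hcnt : ∀ u : Int, rest.count u
        = (rest.takeWhile (fun x => x == v)).count u + (rest.dropWhile (fun x => x == v)).count u := by
      intro u; conv_lhs => rw [hsplit]
      exact List.count_append ..
    have hcntv : (rest.dropWhile (fun x => x == v)).count v = 0 := by
      rw [List.count_eq_zero]
      intro hv; exact absurd (hgt v hv) (by omega)
    have hcgrpv : (rest.takeWhile (fun x => x == v)).count v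
        = (rest.takeWhile (fun x => x == v)).length := by
      rw [List.count_eq_length]
      intro b hb; exact (hgrp b hb).symm
    have hcv : (v :: rest).count v = (rest.takeWhile (fun x => x == v)).length + 1 := by
      rw [List.count_cons_self, hcnt v, hcntv, hcgrpv]
    rw [tallyL]
    constructor
    · intro hm
      rcases List.mem_cons.mp hm with he | hm'
      · obtain ⟨rfl, rfl⟩ : t = v ∧ c = ((rest.takeWhile (fun x => x == v)).length : Int) + 1 := by
          exact ⟨congrArg Prod.fst he, congrArg Prod.snd he⟩
        refine ⟨List.mem_cons_self, ?_⟩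
        rw [hcv]; push_cast; ring
      · obtain ⟨hmem, rfl⟩ := (ih htl).mp hm'
        have hne : t ≠ v := by have := hgt t hmem; omega
        have hcg : (rest.takeWhile (fun x => x == v)).count t = 0 := by
          rw [List.count_eq_zero]
          intro hg; exact hne (hgrp t hg)
        refine ⟨List.mem_cons_of_mem _ (List.Sublist.mem hmem (List.dropWhile_sublist _)), ?_⟩
        rw [List.count_cons_of_ne (by omega), hcnt t, hcg]
        push_cast; ring
    · rintro ⟨hmem, rfl⟩
      by_cases htv : t = v
      · subst htv
        refine List.mem_cons.mpr (Or.inl ?_)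
        rw [hcv]; push_cast; ring_nf
      · have hmem' : t ∈ rest := by
          rcases List.mem_cons.mp hmem with rfl | hr
          · exact absurd rfl htv
          · exact hr
        have hcg : (rest.takeWhile (fun x => x == v)).count t = 0 := by
          rw [List.count_eq_zero]
          intro hg; exact htv (hgrp t hg)
        have hmemtl : t ∈ rest.dropWhile (fun x => x == v) := by
          conv at hmem' => rw [hsplit]
          rcases List.mem_append.mp hmem' with hg | htl'
          · exact absurd hg (by intro hg'; exact htv (hgrp t hg'))
          · exact htl'
        refine List.mem_cons.mpr (Or.inr ?_)
        have hceq : (v :: rest).count t = (rest.dropWhile (fun x => x == v)).count t := by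
          rw [List.count_cons_of_ne (by omega), hcnt t, hcg]
          omega
        exact (ih htl).mpr ⟨hmemtl, by exact_mod_cast hceq⟩

lemma pairwise_keys_tallyL (s : List Int) (hs : s.Pairwise (· ≤ ·)) :
    (tallyL s).Pairwise (fun a b => a.1 < b.1) := by
  induction s using tallyL.induct with
  | case1 => simp [tallyL]
  | case2 v rest ih =>
    have hrest : rest.Pairwise (· ≤ ·) := (List.pairwise_cons.mp hs).2
    have hvle : ∀ x ∈ rest, v ≤ x := (List.pairwise_cons.mp hs).1
    have htl : (rest.dropWhile (fun x => x == v)).Pairwise (· ≤ ·) :=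
      List.Pairwise.sublist (List.dropWhile_sublist _) hrest
    have hgt := lt_of_mem_dropWhile v rest hrest hvle
    rw [tallyL]
    refine List.pairwise_cons.mpr ⟨?_, ih htl⟩
    intro q hq
    have : q.1 ∈ rest.dropWhile (fun x => x == v) := by
      have := (mem_tallyL _ htl q.1 q.2).mp (by simpa using hq)
      exact this.1
    exact hgt q.1 this

-- A loop inserting fresh distinct keys under a filter appends exactly the filtered pairs.
lemma items_foldl_cond_insert {α : Type} (l : List α) (key : α → Int) (p : α → Bool)
    (v : α → Int) (d : PySem.Dict Int Int)
    (hf : ∀ a ∈ l, d.contains (key a) = false) (hnd : (l.map key).Nodup) :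
    (l.foldl (fun d a => if p a then d.insert (key a) (v a) else d) d).items
      = d.items ++ (l.filter p).map (fun a => (key a, v a)) := by
  induction l generalizing d with
  | nil => simp
  | cons a l ih =>
    simp only [List.map_cons, List.nodup_cons] at hnd
    by_cases hpa : p a = true
    · have hfresh : ∀ b ∈ l, (d.insert (key a) (v a)).contains (key b) = false := by
        intro b hb
        rw [PySem.Dict.contains_insert]
        have h1 : (key b == key a) = false := by
          have : key b ≠ key a := fun he => hnd.1 (he ▸ List.mem_map_of_mem hb)
          simpa using this
        rw [h1, hf b (List.mem_cons_of_mem _ hb)]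
        rfl
      simp only [List.foldl_cons, List.filter_cons, hpa, if_true, List.map_cons]
      rw [ih _ hfresh hnd.2,
          PySem.Dict.items_insert_of_not_contains d (v a) (hf a List.mem_cons_self)]
      simp
    · simp only [List.foldl_cons, List.filter_cons]
      rw [if_neg (by simpa using hpa), ih _ (fun b hb => hf b (List.mem_cons_of_mem _ hb)) hnd.2]
      simp [hpa]

lemma innerA_items (row : List Int) :
    ((PySem.List.pyRange 1 11 1).foldl
      (fun tC t => if row.contains t then tC.insert t ((PySem.List.count row t : Int)) else tC)
      PySem.Dict.empty).items
    = ((PySem.List.pyRange 1 11 1).filter (fun t => row.contains t)).map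
        (fun t => (t, (PySem.List.count row t : Int))) := by
  have h := items_foldl_cond_insert (PySem.List.pyRange 1 11 1) (fun t => t)
      (fun t => row.contains t) (fun t => (PySem.List.count row t : Int)) PySem.Dict.empty
      (fun a _ => PySem.Dict.contains_empty a)
      (by simpa using PySem.List.nodup_pyRange_one 1 11)
  simpa using h

lemma innerB_items (row : List Int) :
    ((pvTally (PySem.List.sorted row (fun x => x) false) 0 []).foldl
      (fun (d : PySem.Dict Int Int) tc =>
        if (decide (1 ≤ tc.1) && decide (tc.1 ≤ 10)) then d.insert tc.1 tc.2 else d)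
      PySem.Dict.empty).items
    = ((tallyL (PySem.List.sorted row (fun x => x) false)).filter
        (fun tc => decide (1 ≤ tc.1) && decide (tc.1 ≤ 10))).map (fun tc => (tc.1, tc.2)) := by
  have hs : (PySem.List.sorted row (fun x => x) false).Pairwise ((· ≤ ·) : Int → Int → Prop) := by
    simpa using PySem.List.sorted_pairwise row (fun x => x)
  have hnd : ((tallyL (PySem.List.sorted row (fun x => x) false)).map Prod.fst).Nodup := by
    have hpw : ((tallyL (PySem.List.sorted row (fun x => x) false)).map Prod.fst).Pairwise (· < ·) :=
      List.pairwise_map.mpr (pairwise_keys_tallyL _ hs)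
    exact hpw.imp (fun {a b} h => by omega)
  have h := items_foldl_cond_insert (tallyL (PySem.List.sorted row (fun x => x) false))
      Prod.fst (fun tc => decide (1 ≤ tc.1) && decide (tc.1 ≤ 10)) Prod.snd PySem.Dict.empty
      (fun a _ => PySem.Dict.contains_empty a.1) hnd
  rw [pvTally_eq_tallyL]
  simpa using h

lemma inner_eq (row : List Int) :
    ((PySem.List.pyRange 1 11 1).foldl
      (fun tC t => if row.contains t then tC.insert t ((PySem.List.count row t : Int)) else tC)
      PySem.Dict.empty).items
    = ((pvTally (PySem.List.sorted row (fun x => x) false) 0 []).foldl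
      (fun (d : PySem.Dict Int Int) tc =>
        if (decide (1 ≤ tc.1) && decide (tc.1 ≤ 10)) then d.insert tc.1 tc.2 else d)
      PySem.Dict.empty).items := by
  rw [innerA_items, innerB_items]
  have hmapid : ((tallyL (PySem.List.sorted row (fun x => x) false)).filter
        (fun tc => decide (1 ≤ tc.1) && decide (tc.1 ≤ 10))).map (fun tc => (tc.1, tc.2))
      = (tallyL (PySem.List.sorted row (fun x => x) false)).filter
        (fun tc => decide (1 ≤ tc.1) && decide (tc.1 ≤ 10)) := by
    simp
  rw [hmapid]
  set S := PySem.List.sorted row (fun x => x) false with hS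
  have hsorted : S.Pairwise ((· ≤ ·) : Int → Int → Prop) := by
    simpa [hS] using PySem.List.sorted_pairwise row (fun x => x)
  have hperm : S.Perm row := PySem.List.sorted_perm row (fun x => x) false
  set LA := ((PySem.List.pyRange 1 11 1).filter (fun t => row.contains t)).map
      (fun t => (t, (PySem.List.count row t : Int))) with hLA
  set LB := (tallyL S).filter (fun tc => decide (1 ≤ tc.1) && decide (tc.1 ≤ 10)) with hLB
  have hpa : LA.Pairwise (fun a b : Int × Int => a.1 < b.1) := by
    rw [hLA]
    refine List.pairwise_map.mpr ?_
    exact List.Pairwise.sublist List.filter_sublist (PySem.List.pairwise_lt_pyRange_one 1 11)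
  have hpb : LB.Pairwise (fun a b : Int × Int => a.1 < b.1) := by
    rw [hLB]
    exact List.Pairwise.sublist List.filter_sublist (pairwise_keys_tallyL S hsorted)
  have hmemA : ∀ t c : Int, (t, c) ∈ LA ↔ (1 ≤ t ∧ t < 11) ∧ t ∈ row ∧ c = (row.count t : Int) := by
    intro t c
    rw [hLA]
    simp only [List.mem_map, List.mem_filter, PySem.List.mem_pyRange_one, Prod.mk.injEq]
    constructor
    · rintro ⟨u, ⟨hu, hcont⟩, rfl, rfl⟩
      exact ⟨hu, by simpa using hcont, by rw [PySem.List.count_eq]⟩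
    · rintro ⟨hu, hmem, rfl⟩
      exact ⟨t, ⟨hu, by simpa using hmem⟩, rfl, by rw [PySem.List.count_eq]⟩
  have hmemB : ∀ t c : Int, (t, c) ∈ LB ↔ (1 ≤ t ∧ t ≤ 10) ∧ t ∈ row ∧ c = (row.count t : Int) := by
    intro t c
    rw [hLB]
    simp only [List.mem_filter]
    rw [mem_tallyL S hsorted t c]
    rw [hperm.mem_iff, hperm.count_eq]
    constructor
    · rintro ⟨⟨hm, rfl⟩, hcond⟩
      refine ⟨?_, hm, rfl⟩
      simpa using hcond
    · rintro ⟨hr, hm, rfl⟩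
      exact ⟨⟨hm, rfl⟩, by simpa using hr⟩
  have hnodA : LA.Nodup := hpa.imp (fun {a b} h => fun he => by rw [he] at h; omega)
  have hnodB : LB.Nodup := hpb.imp (fun {a b} h => fun he => by rw [he] at h; omega)
  have hperm2 : LA.Perm LB := by
    rw [List.perm_ext_iff_of_nodup hnodA hnodB]
    rintro ⟨t, c⟩
    rw [hmemA t c, hmemB t c]
    constructor
    · rintro ⟨h1, h2⟩; exact ⟨⟨h1.1, by omega⟩, h2⟩
    · rintro ⟨h1, h2⟩; exact ⟨⟨h1.1, by omega⟩, h2⟩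
  exact hperm2.eq_of_pairwise
    (fun a b _ _ h1 h2 => by exact absurd h2 (by omega)) hpa hpb

-- Each outer fold is a loop inserting fresh distinct keys into an empty dict: its items are a map.
lemma itemsA (fp : List (List Int)) :
    calcFromToCounters fp
    = (PySem.List.pyRange 0 fp.length 1).map (fun f =>
        (f + 1,
         ((PySem.List.pyRange 1 11 1).foldl
           (fun tC t =>
             if (PySem.List.pyGetD fp f []).contains t then
               tC.insert t ((PySem.List.count (PySem.List.pyGetD fp f []) t : Int))
             else tC)
           PySem.Dict.empty).items)) := by
  unfold calcFromToCounters
  rw [PySem.Dict.items_foldl_insert_fresh _ (fun f => f + 1) _ _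
        (by intro a _; exact PySem.Dict.contains_empty _)
        ((PySem.List.nodup_pyRange_one 0 fp.length).map (fun a b h => by omega))]
  rfl

lemma itemsB (fp : List (List Int)) :
    calcFromToCounters_alt fp
    = (PySem.List.enumerate fp 1).map (fun p =>
        (p.1,
         ((pvTally (PySem.List.sorted p.2 (fun x => x) false) 0 []).foldl
           (fun (d : PySem.Dict Int Int) tc =>
             if (decide (1 ≤ tc.1) && decide (tc.1 ≤ 10)) then d.insert tc.1 tc.2 else d)
           PySem.Dict.empty).items)) := by
  unfold calcFromToCounters_alt
  rw [PySem.Dict.items_foldl_insert_fresh (PySem.List.enumerate fp 1) (fun p => p.1)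
        (fun p =>
          ((pvTally (PySem.List.sorted p.2 (fun x => x) false) 0 []).foldl
            (fun (d : PySem.Dict Int Int) tc =>
              if (decide (1 ≤ tc.1) && decide (tc.1 ≤ 10)) then d.insert tc.1 tc.2 else d)
            PySem.Dict.empty).items) _
        (by intro a _; exact PySem.Dict.contains_empty _)
        (by rw [PySem.List.map_fst_enumerate]; exact PySem.List.nodup_pyRange_one 1 (1 + fp.length))]
  rfl

-- ===== VERDICT (by name: the statement is the Claim_ definition above) =====
theorem calcFromToCounters_spec : Claim_equal_calcFromToCounters := by
  intro fp _
  show calcFromToCounters fp = calcFromToCounters_alt fp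
  rw [itemsA, itemsB]
  apply List.ext_getElem
  · simp [PySem.List.length_enumerate, PySem.List.length_pyRange_one]
  · intro k h1 h2
    simp only [List.getElem_map, PySem.List.getElem_enumerate, PySem.List.getElem_pyRange_one]
    have hk : k < fp.length := by
      simpa [PySem.List.length_pyRange_one] using h1
    have hget : PySem.List.pyGetD fp (0 + (k : Int)) [] = fp[k] := by
      simp [PySem.List.pyGetD_natCast, hk]
    rw [hget]
    refine Prod.ext (by push_cast; ring) ?_
    simpa using inner_eq fp[k]
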